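-- pv_equiv track=rewrite | github.com/zhuozhi-ge/Fundamentals-of-Computing-Specialization | Algorithmic Thinking I/Applications/A2 Computer network.py | weight_nodes
-- ===== SOURCE A (Python) =====
-- def weight_nodes(nodes, edges):
--     """
--     Parameters
--     ----------
--     nodes : set of ints, nodes
--     edges : set of tuples, edges
--     Returns
--     -------
--     a list of the weight of each node
--
--     """
--     weights = []
--     for node in nodes:
--         weights.append(node)
--         for edge in edges:
--             if node in edge:
--                 weights.append(node)
--     return weights
-- ===== SOURCE B (Python) =====
-- def weight_nodes(nodes, edges):
--     deg = {}
--     for u, v in edges: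
--         deg[u] = deg.get(u, 0) + 1
--         if v != u:
--             deg[v] = deg.get(v, 0) + 1
--     return [x for n in nodes for x in [n] * (1 + deg.get(n, 0))]
-- ===== Notes on version B (the rewrite author's own statement) =====
-- stated objective: faster
-- what changed: Instead of scanning all edges once per node, B counts each node's incident edges in a single pass over the edges into a dict and then emits each node 1+degree times.
import Mathlib
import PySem

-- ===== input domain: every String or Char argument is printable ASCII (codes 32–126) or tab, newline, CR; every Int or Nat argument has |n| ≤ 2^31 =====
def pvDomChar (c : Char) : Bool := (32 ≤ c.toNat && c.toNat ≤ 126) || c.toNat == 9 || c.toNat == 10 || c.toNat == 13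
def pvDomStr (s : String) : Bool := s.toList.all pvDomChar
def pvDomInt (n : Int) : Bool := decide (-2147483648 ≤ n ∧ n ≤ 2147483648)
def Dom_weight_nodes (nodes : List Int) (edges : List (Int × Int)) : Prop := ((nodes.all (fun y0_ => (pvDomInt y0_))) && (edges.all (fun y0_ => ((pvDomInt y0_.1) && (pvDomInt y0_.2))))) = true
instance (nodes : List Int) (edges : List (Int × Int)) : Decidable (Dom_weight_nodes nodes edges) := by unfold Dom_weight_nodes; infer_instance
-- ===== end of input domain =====

-- B replaces A's per-node scan of all edges by one pass over the edges that counts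
-- degrees in a dict, then emits each node 1+degree times (objective: faster, O(V+E) vs O(V*E)).

-- ===== PORT A =====
-- for node in nodes: append node; for edge in edges: if node in edge: append node
def weight_nodes (nodes : List Int) (edges : List (Int × Int)) : List Int :=
  nodes.foldl (fun weights node =>
    edges.foldl (fun w e => if node = e.1 ∨ node = e.2 then w ++ [node] else w)
      (weights ++ [node])) []

-- ===== PORT B =====
-- deg = {}; for u, v in edges: deg[u] = deg.get(u,0)+1; if v != u: deg[v] = deg.get(v,0)+1
def bDeg (edges : List (Int × Int)) : PySem.Dict Int Int :=
  edges.foldl (fun d e =>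
    let d1 := d.insert e.1 (d.getD e.1 0 + 1)
    if e.2 ≠ e.1 then d1.insert e.2 (d1.getD e.2 0 + 1) else d1) PySem.Dict.empty

-- return [x for n in nodes for x in [n] * (1 + deg.get(n, 0))]
def weight_nodes_alt (nodes : List Int) (edges : List (Int × Int)) : List Int :=
  let deg := bDeg edges
  nodes.flatMap (fun n => List.replicate (1 + deg.getD n 0).toNat n)

-- ===== PRECONDITION & SPEC =====
def Spec_weight_nodes (nodes : List Int) (edges : List (Int × Int)) (out : List Int) : Prop := out = weight_nodes_alt nodes edges
instance (nodes : List Int) (edges : List (Int × Int)) (out : List Int) : Decidable (Spec_weight_nodes nodes edges out) := by unfold Spec_weight_nodes; infer_instance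

-- ===== CLAIM (what is proved, stated in full; the proofs are below) =====
def Claim_equal_weight_nodes : Prop := ∀ (nodes : List Int) (edges : List (Int × Int)), Dom_weight_nodes nodes edges → Spec_weight_nodes nodes edges (weight_nodes nodes edges)

-- ===== LEMMAS AND PROOFS =====

-- the degree dict counts, for each n, the edges incident to n (a self-loop counts once)
lemma bDeg_getD (edges : List (Int × Int)) (d : PySem.Dict Int Int) (n : Int) :
    (edges.foldl (fun d e =>
      let d1 := d.insert e.1 (d.getD e.1 0 + 1)
      if e.2 ≠ e.1 then d1.insert e.2 (d1.getD e.2 0 + 1) else d1) d).getD n 0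
    = d.getD n 0 + (edges.countP (fun e => decide (n = e.1 ∨ n = e.2)) : Int) := by
  induction edges generalizing d with
  | nil => simp
  | cons e rest ih =>
    rw [List.foldl_cons, ih, List.countP_cons]
    by_cases h2 : e.2 = e.1 <;> by_cases hn1 : n = e.1 <;> by_cases hn2 : n = e.2 <;>
      simp [PySem.Dict.getD_insert, h2, hn1, hn2] <;> omega

-- A's inner loop over edges appends node once per incident edge
lemma inner_loop (edges : List (Int × Int)) (node : Int) (acc : List Int) :
    edges.foldl (fun w e => if node = e.1 ∨ node = e.2 then w ++ [node] else w) acc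
    = acc ++ List.replicate (edges.countP (fun e => decide (node = e.1 ∨ node = e.2))) node := by
  induction edges generalizing acc with
  | nil => simp
  | cons e rest ih =>
    rw [List.foldl_cons, List.countP_cons]
    by_cases h : node = e.1 ∨ node = e.2
    · rw [if_pos h, ih]
      simp [h, List.replicate_succ, List.append_assoc]
    · rw [if_neg h, ih]
      simp [h]

lemma outer_loop (nodes : List Int) (edges : List (Int × Int)) (acc : List Int) :
    nodes.foldl (fun weights node =>
      edges.foldl (fun w e => if node = e.1 ∨ node = e.2 then w ++ [node] else w)
        (weights ++ [node])) acc
    = acc ++ nodes.flatMap (fun n =>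
        n :: List.replicate (edges.countP (fun e => decide (n = e.1 ∨ n = e.2))) n) := by
  induction nodes generalizing acc with
  | nil => simp
  | cons n rest ih =>
    rw [List.foldl_cons, inner_loop, ih]
    simp

-- ===== VERDICT (by name: the statement is the Claim_ definition above) =====
theorem weight_nodes_spec : Claim_equal_weight_nodes := by
  intro nodes edges _
  unfold Spec_weight_nodes weight_nodes weight_nodes_alt bDeg
  rw [outer_loop]
  simp only [List.nil_append]
  apply List.flatMap_congr
  intro n _
  rw [bDeg_getD]
  have h : (0:Int) ≤ (List.countP (fun e => decide (n = e.1 ∨ n = e.2)) edges : Int) := by positivity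
  simp [PySem.Dict.getD_empty]
  rw [Int.toNat_add (by omega) (by omega)]
  have : Int.toNat 1 + ((List.countP (fun e => decide (n = e.1) || decide (n = e.2)) edges : Int)).toNat
       = (List.countP (fun e => decide (n = e.1) || decide (n = e.2)) edges) + 1 := by omega
  rw [this, List.replicate_succ]
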